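-- pv_equiv track=rewrite | github.com/marcottelab/infer_complexes | complex.py | corum_ints_duped
-- ===== SOURCE A (Python) =====
-- def corum_ints_duped(complexes):
--     # complexes: dict{complexid: set([protein1, protein2,...]), .. }
--     # this makes a dictionary{protein1: set([protein2, protein3]), ...}
--     # every interaction is found twice here for fast interaction checking
--     interactions = {}
--     for complex,protein_set in complexes.items():
--         for p in protein_set:
--             partners = protein_set.copy()
--             partners.remove(p)
--             [interactions.setdefault(p,set([])).add(par) for par in partners]
--     return interactions
-- ===== SOURCE B (Python) =====
-- def corum_ints_duped(complexes):
--     # Inverted-index re-implementation: one pass records, per protein, the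
--     # multi-member complexes it belongs to; a final comprehension turns each
--     # bucket into the protein's partner set.
--     member_of = {}
--     for ps in complexes.values():
--         if len(ps) >= 2:
--             for p in ps:
--                 member_of.setdefault(p, []).append(ps)
--     return {p: {q for ps in pss for q in ps if q != p}
--             for p, pss in member_of.items()}
-- ===== Notes on version B (the rewrite author's own statement) =====
-- stated objective: alternative
-- what changed: B builds a staged inverted index (protein -> list of its multi-member complexes) with one pass over the complexes and then produces each protein's partner set by one comprehension per bucket, instead of A's incremental dict built by per-protein set copy/remove and setdefault-add.
import Mathlib
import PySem

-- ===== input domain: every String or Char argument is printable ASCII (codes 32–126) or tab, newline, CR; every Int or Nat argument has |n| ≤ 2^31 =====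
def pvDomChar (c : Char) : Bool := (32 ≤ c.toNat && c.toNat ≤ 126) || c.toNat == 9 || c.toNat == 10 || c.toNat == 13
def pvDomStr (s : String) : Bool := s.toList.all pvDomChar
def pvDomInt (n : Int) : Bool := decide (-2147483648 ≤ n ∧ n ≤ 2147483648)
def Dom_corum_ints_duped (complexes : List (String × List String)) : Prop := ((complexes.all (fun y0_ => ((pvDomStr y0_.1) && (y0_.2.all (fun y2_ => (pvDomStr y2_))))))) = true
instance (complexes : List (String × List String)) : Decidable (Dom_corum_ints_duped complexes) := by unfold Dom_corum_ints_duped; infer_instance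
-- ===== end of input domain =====

-- B replaces A's incremental partner-set dict (per-protein set copy/remove + setdefault-add)
-- by a staged inverted index (protein -> its multi-member complexes) finished off by one
-- comprehension per bucket (objective: alternative decomposition, same asymptotic cost).

-- ===== PORT A =====
def corum_ints_duped (complexes : List (String × List String)) : List (String × List String) :=
  (complexes.foldl
    (fun (interactions : PySem.Dict String (List String)) cps =>
      cps.2.foldl
        (fun interactions p =>
          -- partners = protein_set.copy(); partners.remove(p)  (KeyError impossible: p is drawn from the set)
          match PySem.Set.remove? cps.2 p with
          | some partners =>
              -- [interactions.setdefault(p, set()).add(par) for par in partners]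
              partners.foldl (fun interactions par =>
                interactions.modify p [] (fun s => PySem.Set.add s par)) interactions
          | none => interactions)
        interactions)
    PySem.Dict.empty).items

-- ===== PORT B =====
def corum_ints_duped_alt (complexes : List (String × List String)) : List (String × List String) :=
  -- member_of = {}; for ps in complexes.values(): if len(ps) >= 2: for p in ps: member_of.setdefault(p, []).append(ps)
  let memberOf :=
    complexes.foldl
      (fun (d : PySem.Dict String (List (List String))) cps =>
        if 2 ≤ cps.2.length then
          cps.2.foldl (fun d p => d.modify p [] (fun l => l ++ [cps.2])) d
        else d)
      PySem.Dict.empty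
  -- {p: {q for ps in pss for q in ps if q != p} for p, pss in member_of.items()}
  memberOf.items.map (fun pr =>
    (pr.1, PySem.Set.ofList (pr.2.flatMap (fun ps => ps.filter (fun q => !(q == pr.1))))))

-- ===== PRECONDITION & SPEC =====
-- Pre_ excludes only member lists with duplicate entries: the Python argument is a
-- dict of SETS, so under the type convention each member list holds distinct
-- elements — a list with duplicates represents no Python input at all.
def Pre_corum_ints_duped (complexes : List (String × List String)) : Prop :=
  ∀ c ∈ complexes, c.2.Nodup
instance (complexes : List (String × List String)) : Decidable (Pre_corum_ints_duped complexes) := by unfold Pre_corum_ints_duped; infer_instance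
def pvWitness_corum_ints_duped : (List (String × List String)) :=
  [("c1", ["a", "b"]), ("c2", ["b", "c", "d"])]
def Spec_corum_ints_duped (complexes : List (String × List String)) (out : List (String × List String)) : Prop := out = corum_ints_duped_alt complexes
instance (complexes : List (String × List String)) (out : List (String × List String)) : Decidable (Spec_corum_ints_duped complexes out) := by unfold Spec_corum_ints_duped; infer_instance

-- ===== CLAIM (what is proved, stated in full; the proofs are below) =====
def Claim_equal_corum_ints_duped : Prop := ∀ (complexes : List (String × List String)), Dom_corum_ints_duped complexes → Pre_corum_ints_duped complexes → Spec_corum_ints_duped complexes (corum_ints_duped complexes)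

-- ===== LEMMAS AND PROOFS =====

-- one setdefault(k, set()).add(v) step on A's interactions dict
def pvAdd (d : PySem.Dict String (List String)) (k v : String) : PySem.Dict String (List String) :=
  d.modify k [] (fun s => PySem.Set.add s v)

-- run a list of A's (key, value) add-operations
def pvRun (d : PySem.Dict String (List String)) (ops : List (String × String)) : PySem.Dict String (List String) :=
  ops.foldl (fun d op => pvAdd d op.1 op.2) d

-- the operation stream of A's per-complex loop
def pvOpsA (ps : List String) : List (String × String) :=
  ps.flatMap (fun p => (ps.filter (fun q => !(q == p))).map (fun q => (p, q)))

-- A's whole operation stream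
def pvFull (complexes : List (String × List String)) : List (String × String) :=
  complexes.flatMap (fun c => pvOpsA c.2)

-- the values an op stream sends to key k, in order
def pvW (k : String) (ops : List (String × String)) : List String :=
  (ops.filter (fun op => op.1 == k)).map (·.2)

-- B's bucket-append step, its operation stream, its run, its per-key stream
def pvAdd2 (d : PySem.Dict String (List (List String))) (k : String) (v : List String) :
    PySem.Dict String (List (List String)) :=
  d.modify k [] (fun l => l ++ [v])

def pvRun2 (d : PySem.Dict String (List (List String))) (ops : List (String × List String)) :
    PySem.Dict String (List (List String)) :=
  ops.foldl (fun d op => pvAdd2 d op.1 op.2) d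

def pvOpsB (complexes : List (String × List String)) : List (String × List String) :=
  complexes.flatMap (fun c => if 2 ≤ c.2.length then c.2.map (fun p => (p, c.2)) else [])

def pvW2 (k : String) (ops : List (String × List String)) : List (List String) :=
  (ops.filter (fun op => op.1 == k)).map (·.2)

lemma pvAdd_get?_self (d : PySem.Dict String (List String)) (k v : String) :
    (pvAdd d k v).get? k = some (PySem.Set.add ((d.get? k).getD []) v) := by
  simp [pvAdd, PySem.Dict.modify, PySem.Dict.getD, PySem.Dict.get?_insert_self]

lemma pvAdd_get?_ne (d : PySem.Dict String (List String)) (k k' v : String) (h : k' ≠ k) :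
    (pvAdd d k v).get? k' = d.get? k' := by
  simp [pvAdd, PySem.Dict.modify, PySem.Dict.get?_insert_of_ne _ _ h]

lemma pvRun_get? (ops : List (String × String)) :
    ∀ (d : PySem.Dict String (List String)) (k : String),
    (pvRun d ops).get? k =
      if pvW k ops = [] then d.get? k
      else some (PySem.Set.update ((d.get? k).getD []) (pvW k ops)) := by
  induction ops with
  | nil => intro d k; simp [pvRun, pvW]
  | cons op rest ih =>
    intro d k
    obtain ⟨a, v⟩ := op
    show (pvRun (pvAdd d a v) rest).get? k = _
    rw [ih]
    by_cases hak : a = k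
    · rw [hak]
      have h1 : pvW k ((k, v) :: rest) = v :: pvW k rest := by simp [pvW]
      rw [pvAdd_get?_self, h1]
      simp only [Option.getD_some, reduceCtorEq, if_false]
      split_ifs with h
      · rw [h]; simp [PySem.Set.update]
      · rfl
    · have h1 : pvW k ((a, v) :: rest) = pvW k rest := by
        simp [pvW, hak]
      rw [h1, pvAdd_get?_ne d a k v (fun h => hak h.symm)]

lemma pvRun_keys (d : PySem.Dict String (List String)) (ops : List (String × String)) :
    (pvRun d ops).keys = PySem.Set.update d.keys (ops.map (·.1)) := by
  exact PySem.Dict.keys_foldl_modify_key ops (·.1) [] (fun _ op s => PySem.Set.add s op.2) d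

lemma pvRun_nodup (d : PySem.Dict String (List String)) (ops : List (String × String))
    (h : d.keys.Nodup) : (pvRun d ops).keys.Nodup := by
  exact PySem.Dict.nodup_keys_foldl_modify_key ops (·.1) [] (fun _ op s => PySem.Set.add s op.2) d h

lemma pvRun_append (d : PySem.Dict String (List String)) (a b : List (String × String)) :
    pvRun d (a ++ b) = pvRun (pvRun d a) b := List.foldl_append

lemma pvAdd2_get?_self (d : PySem.Dict String (List (List String))) (k : String) (v : List String) :
    (pvAdd2 d k v).get? k = some (((d.get? k).getD []) ++ [v]) := by
  simp [pvAdd2, PySem.Dict.modify, PySem.Dict.getD, PySem.Dict.get?_insert_self]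

lemma pvAdd2_get?_ne (d : PySem.Dict String (List (List String))) (k k' : String) (v : List String)
    (h : k' ≠ k) : (pvAdd2 d k v).get? k' = d.get? k' := by
  simp [pvAdd2, PySem.Dict.modify, PySem.Dict.get?_insert_of_ne _ _ h]

lemma pvRun2_get? (ops : List (String × List String)) :
    ∀ (d : PySem.Dict String (List (List String))) (k : String),
    (pvRun2 d ops).get? k =
      if pvW2 k ops = [] then d.get? k
      else some (((d.get? k).getD []) ++ pvW2 k ops) := by
  induction ops with
  | nil => intro d k; simp [pvRun2, pvW2]
  | cons op rest ih =>
    intro d k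
    obtain ⟨a, v⟩ := op
    show (pvRun2 (pvAdd2 d a v) rest).get? k = _
    rw [ih]
    by_cases hak : a = k
    · rw [hak]
      have h1 : pvW2 k ((k, v) :: rest) = v :: pvW2 k rest := by simp [pvW2]
      rw [pvAdd2_get?_self, h1]
      simp only [Option.getD_some, reduceCtorEq, if_false]
      split_ifs with h
      · rw [h]
      · rw [List.append_assoc, List.singleton_append]
    · have h1 : pvW2 k ((a, v) :: rest) = pvW2 k rest := by
        simp [pvW2, hak]
      rw [h1, pvAdd2_get?_ne d a k v (fun h => hak h.symm)]

lemma pvRun2_keys (d : PySem.Dict String (List (List String))) (ops : List (String × List String)) :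
    (pvRun2 d ops).keys = PySem.Set.update d.keys (ops.map (·.1)) := by
  exact PySem.Dict.keys_foldl_modify_key ops (·.1) [] (fun _ op l => l ++ [op.2]) d

lemma pvRun2_append (d : PySem.Dict String (List (List String)))
    (a b : List (String × List String)) :
    pvRun2 d (a ++ b) = pvRun2 (pvRun2 d a) b := List.foldl_append

lemma pv_assoc_ext {ν : Type} : ∀ (l l' : List (String × ν)),
    l.map Prod.fst = l'.map Prod.fst → (l.map Prod.fst).Nodup →
    (∀ k, (l.find? (fun p => p.1 == k)).map Prod.snd = (l'.find? (fun p => p.1 == k)).map Prod.snd) →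
    l = l' := by
  intro l
  induction l with
  | nil =>
    intro l' hk _ _
    cases l' with
    | nil => rfl
    | cons b t' => simp at hk
  | cons a t ih =>
    intro l' hk hn hv
    cases l' with
    | nil => simp at hk
    | cons b t' =>
      obtain ⟨a1, a2⟩ := a
      obtain ⟨b1, b2⟩ := b
      simp only [List.map_cons, List.cons.injEq] at hk
      obtain ⟨hfst, htl⟩ := hk
      subst hfst
      have hval : a2 = b2 := by
        have := hv a1
        simp at this
        exact this
      subst hval
      have hn' : (t.map Prod.fst).Nodup ∧ a1 ∉ t.map Prod.fst := by
        simp only [List.map_cons, List.nodup_cons] at hn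
        exact ⟨hn.2, hn.1⟩
      have : t = t' := by
        apply ih t' htl hn'.1
        intro k
        by_cases hk1 : k = a1
        · subst hk1
          have h1 : t.find? (fun p => p.1 == k) = none := by
            apply List.find?_eq_none.2
            intro p hp hbeq
            exact hn'.2 (by
              have : p.1 = k := by simpa using hbeq
              rw [← this]; exact List.mem_map_of_mem hp)
          have h2 : t'.find? (fun p => p.1 == k) = none := by
            apply List.find?_eq_none.2
            intro p hp hbeq
            have hpk : p.1 = k := by simpa using hbeq
            have : p.1 ∈ t'.map Prod.fst := List.mem_map_of_mem hp
            rw [← htl] at this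
            rw [hpk] at this
            exact hn'.2 this
          rw [h1, h2]
        · have := hv k
          have hne : (a1 == k) = false := by simp [beq_eq_false_iff_ne]; exact fun h => hk1 h.symm
          simpa [List.find?_cons, hne] using this
      rw [this]

lemma pv_update_mem : ∀ (l : List String) (s : PySem.Set String), (∀ y ∈ l, y ∈ s) →
    PySem.Set.update s l = s := by
  intro l
  induction l with
  | nil => intro s _; rfl
  | cons y rest ih =>
    intro s h
    show PySem.Set.update (PySem.Set.add s y) rest = s
    rw [PySem.Set.add_of_mem (h y (by simp))]
    exact ih s (fun z hz => h z (by simp [hz]))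

lemma pv_update_const (p : String) :
    ∀ (l : List String) (s : PySem.Set String), l ≠ [] →
    PySem.Set.update s (l.map (fun _ => p)) = PySem.Set.add s p := by
  intro l
  induction l with
  | nil => intro s h; exact absurd rfl h
  | cons q rest ih =>
    intro s _
    show PySem.Set.update (PySem.Set.add s p) (rest.map (fun _ => p)) = PySem.Set.add s p
    apply pv_update_mem
    intro y hy
    have : y = p := by
      obtain ⟨z, _, hz⟩ := List.mem_map.1 hy
      exact hz.symm
    rw [this]
    exact (PySem.Set.mem_add s p p).2 (Or.inr rfl)

lemma pv_update_flatMap_blocks (ps : List String) :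
    ∀ (l : List String) (s : PySem.Set String),
    (∀ p ∈ l, ps.filter (fun q => !(q == p)) ≠ []) →
    PySem.Set.update s (l.flatMap (fun p => (ps.filter (fun q => !(q == p))).map (fun _ => p)))
      = PySem.Set.update s l := by
  intro l
  induction l with
  | nil => intro s _; rfl
  | cons p rest ih =>
    intro s h
    rw [List.flatMap_cons, PySem.Set.update, List.foldl_append]
    show PySem.Set.update (PySem.Set.update s ((ps.filter (fun q => !(q == p))).map (fun _ => p))) _ = _
    rw [pv_update_const p _ s (h p (by simp))]
    exact ih (PySem.Set.add s p) (fun q hq => h q (by simp [hq]))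

-- a multi-member Nodup complex keeps a partner ≠ k for its member k
lemma pv_filter_ne_nil (ps : List String) (h2 : 2 ≤ ps.length) (hn : ps.Nodup) (k : String)
    (hk : k ∈ ps) : ps.filter (fun q => !(q == k)) ≠ [] := by
  intro hnil
  have hall : ∀ q ∈ ps, q = k := by
    intro q hq
    have := (List.filter_eq_nil_iff.1 hnil) q hq
    simpa using this
  match ps, h2, hn with
  | a :: b :: t, _, hn =>
    have := (hall a (by simp)).trans (hall b (by simp)).symm
    exact (List.nodup_cons.1 hn).1 (this ▸ List.mem_cons_self)

-- a short Nodup complex containing k is exactly [k]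
lemma pv_short_eq_singleton (ps : List String) (h2 : ¬ 2 ≤ ps.length) (k : String)
    (hk : k ∈ ps) : ps = [k] := by
  match ps, hk with
  | [x], hk =>
    have : k = x := by simpa using hk
    rw [this]
  | x :: y :: t, _ => exact absurd (by simp) h2

lemma pv_keysA (ps : List String) (h2 : 2 ≤ ps.length) (hn : ps.Nodup)
    (s : PySem.Set String) :
    PySem.Set.update s ((pvOpsA ps).map Prod.fst) = PySem.Set.update s ps := by
  have hmap : (pvOpsA ps).map Prod.fst
      = ps.flatMap (fun p => (ps.filter (fun q => !(q == p))).map (fun _ => p)) := by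
    simp [pvOpsA, List.map_flatMap]
  rw [hmap]
  apply pv_update_flatMap_blocks
  intro p hp
  exact pv_filter_ne_nil ps h2 hn p hp

lemma pv_opsA_short (ps : List String) (h : ps.length < 2) : pvOpsA ps = [] := by
  match ps, h with
  | [], _ => rfl
  | [x], _ => simp [pvOpsA]

lemma pv_flatMap_single {LA : Type} (k : String) (c : List LA) :
    ∀ (l : List String), l.Nodup →
    (l.flatMap fun p => if p == k then c else []) = if k ∈ l then c else [] := by
  intro l
  induction l with
  | nil => intro _; simp
  | cons x rest ih =>
    intro hn
    rw [List.flatMap_cons, ih (List.nodup_cons.1 hn).2]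
    by_cases hxk : x = k
    · subst hxk
      have hknotin : x ∉ rest := (List.nodup_cons.1 hn).1
      simp [hknotin]
    · simp only [beq_iff_eq, if_neg hxk, List.nil_append, List.mem_cons]
      by_cases hk : k ∈ rest
      · simp [hk]
      · simp only [if_neg hk]
        rw [if_neg]
        intro hmem
        rcases hmem with h1 | h1
        · exact hxk h1.symm
        · exact hk h1

lemma pv_wA (k : String) (ps : List String) (hn : ps.Nodup) :
    pvW k (pvOpsA ps) = if k ∈ ps then ps.filter (fun q => !(q == k)) else [] := by
  have h1 : pvW k (pvOpsA ps)
      = ps.flatMap (fun p => if p == k then ps.filter (fun q => !(q == k)) else []) := by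
    simp only [pvW, pvOpsA, List.filter_flatMap, List.map_flatMap]
    apply List.flatMap_congr
    intro p hp
    by_cases hpk : p = k
    · subst hpk
      simp [List.filter_map, Function.comp]
    · simp [List.filter_map, Function.comp, hpk]
  rw [h1, pv_flatMap_single k _ ps hn]

lemma pv_stepA_run (ps : List String) :
    ∀ (l : List String), (∀ p ∈ l, p ∈ ps) → ∀ d,
    l.foldl
      (fun interactions p =>
        match PySem.Set.remove? ps p with
        | some partners =>
            partners.foldl (fun interactions par =>
              interactions.modify p [] (fun s => PySem.Set.add s par)) interactions
        | none => interactions) d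
    = pvRun d (l.flatMap (fun p => (ps.filter (fun q => !(q == p))).map (fun q => (p, q)))) := by
  intro l
  induction l with
  | nil => intro _ d; rfl
  | cons p rest ih =>
    intro h d
    have hc : PySem.Set.contains ps p = true := (PySem.Set.contains_iff ps p).2 (h p (by simp))
    show (rest.foldl _
      (match PySem.Set.remove? ps p with
        | some partners =>
            partners.foldl (fun (interactions : PySem.Dict String (List String)) par =>
              interactions.modify p [] (fun s => PySem.Set.add s par)) d
        | none => d)) = _
    rw [show PySem.Set.remove? ps p = some (PySem.Set.discard ps p) by
      simp [PySem.Set.remove?, (PySem.Set.contains_iff ps p).1 hc]]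
    show rest.foldl _
        ((PySem.Set.discard ps p).foldl (fun (interactions : PySem.Dict String (List String)) par =>
          interactions.modify p [] (fun s => PySem.Set.add s par)) d) = _
    rw [ih (fun q hq => h q (by simp [hq]))]
    rw [List.flatMap_cons]
    rw [pvRun_append]
    congr 1
    show _ = List.foldl (fun d op => pvAdd d op.1 op.2) d ((ps.filter (fun q => !(q == p))).map (fun q => (p, q)))
    rw [List.foldl_map]
    rfl

-- A's whole loop is the run of its full operation stream
lemma pv_A_run : ∀ (complexes : List (String × List String)) (d : PySem.Dict String (List String)),
    complexes.foldl
      (fun (interactions : PySem.Dict String (List String)) cps =>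
        cps.2.foldl
          (fun interactions p =>
            match PySem.Set.remove? cps.2 p with
            | some partners =>
                partners.foldl (fun interactions par =>
                  interactions.modify p [] (fun s => PySem.Set.add s par)) interactions
            | none => interactions)
          interactions) d
    = pvRun d (pvFull complexes) := by
  intro complexes
  induction complexes with
  | nil => intro d; rfl
  | cons cps rest ih =>
    intro d
    rw [List.foldl_cons, pv_stepA_run cps.2 cps.2 (fun p hp => hp) d]
    show _ = pvRun d (pvOpsA cps.2 ++ pvFull rest)
    rw [pvRun_append, ih]
    rfl

-- B's index loop is the run of its operation stream
lemma pv_B_run : ∀ (complexes : List (String × List String))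
    (d : PySem.Dict String (List (List String))),
    complexes.foldl
      (fun (d : PySem.Dict String (List (List String))) cps =>
        if 2 ≤ cps.2.length then
          cps.2.foldl (fun d p => d.modify p [] (fun l => l ++ [cps.2])) d
        else d) d
    = pvRun2 d (pvOpsB complexes) := by
  intro complexes
  induction complexes with
  | nil => intro d; rfl
  | cons cps rest ih =>
    intro d
    rw [List.foldl_cons]
    show _ = pvRun2 d ((if 2 ≤ cps.2.length then cps.2.map (fun p => (p, cps.2)) else []) ++ pvOpsB rest)
    rw [pvRun2_append]
    by_cases h2 : 2 ≤ cps.2.length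
    · rw [if_pos h2, if_pos h2, ih]
      congr 1
      show _ = List.foldl (fun d op => pvAdd2 d op.1 op.2) d (cps.2.map (fun p => (p, cps.2)))
      rw [List.foldl_map]
      rfl
    · rw [if_neg h2, if_neg h2, ih]
      rfl

lemma pv_w_append (k : String) (a b : List (String × String)) :
    pvW k (a ++ b) = pvW k a ++ pvW k b := by
  simp [pvW, List.filter_append]

-- the value stream of key k in A's full stream
lemma pv_w_full (k : String) : ∀ (complexes : List (String × List String)),
    (∀ c ∈ complexes, c.2.Nodup) →
    pvW k (pvFull complexes)
      = (complexes.map Prod.snd).flatMap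
          (fun ps => if k ∈ ps then ps.filter (fun q => !(q == k)) else []) := by
  intro complexes
  induction complexes with
  | nil => intro _; rfl
  | cons c rest ih =>
    intro h
    have hstep : pvFull (c :: rest) = pvOpsA c.2 ++ pvFull rest := rfl
    rw [hstep, pv_w_append, pv_wA k c.2 (h c (by simp)), ih (fun x hx => h x (by simp [hx]))]
    simp [List.flatMap_cons]

lemma pv_seg (k : String) (ps0 : List String) : ∀ (l : List String),
    pvW2 k (l.map (fun p => (p, ps0))) = l.flatMap (fun p => if p == k then [ps0] else []) := by
  intro l
  induction l with
  | nil => rfl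
  | cons x t iht =>
    rw [List.map_cons, List.flatMap_cons, ← iht]
    by_cases hxk : x = k
    · subst hxk
      simp [pvW2]
    · simp [pvW2, hxk]

lemma pv_w2_append (k : String) (a b : List (String × List String)) :
    pvW2 k (a ++ b) = pvW2 k a ++ pvW2 k b := by
  simp [pvW2, List.filter_append]

-- the bucket stream of key k in B's stream
lemma pv_w2_full (k : String) : ∀ (complexes : List (String × List String)),
    (∀ c ∈ complexes, c.2.Nodup) →
    pvW2 k (pvOpsB complexes)
      = (complexes.map Prod.snd).flatMap
          (fun ps => if 2 ≤ ps.length ∧ k ∈ ps then [ps] else []) := by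
  intro complexes
  induction complexes with
  | nil => intro _; rfl
  | cons c rest ih =>
    intro h
    have hstep : pvOpsB (c :: rest)
        = (if 2 ≤ c.2.length then c.2.map (fun p => (p, c.2)) else []) ++ pvOpsB rest := rfl
    rw [hstep, pv_w2_append, ih (fun x hx => h x (by simp [hx]))]
    rw [List.map_cons, List.flatMap_cons]
    congr 1
    by_cases h2 : 2 ≤ c.2.length
    · rw [if_pos h2]
      rw [pv_seg k c.2 c.2, pv_flatMap_single k [c.2] c.2 (h c (by simp))]
      by_cases hk : k ∈ c.2
      · rw [if_pos hk, if_pos ⟨h2, hk⟩]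
      · rw [if_neg hk, if_neg (fun hc => hk hc.2)]
    · rw [if_neg h2, if_neg (fun hc => h2 hc.1)]
      rfl

-- flattening B's buckets (with k removed) reproduces A's value stream for k
lemma pv_streams (k : String) (complexes : List (String × List String))
    (h : ∀ c ∈ complexes, c.2.Nodup) :
    (pvW2 k (pvOpsB complexes)).flatMap (fun ps => ps.filter (fun q => !(q == k)))
      = pvW k (pvFull complexes) := by
  rw [pv_w2_full k complexes h, pv_w_full k complexes h, List.flatMap_assoc]
  apply List.flatMap_congr
  intro ps hps
  obtain ⟨c, hc, hsnd⟩ := List.mem_map.1 hps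
  have hnd : ps.Nodup := hsnd ▸ h c hc
  by_cases hk : k ∈ ps
  · by_cases h2 : 2 ≤ ps.length
    · rw [if_pos ⟨h2, hk⟩, if_pos hk]
      simp
    · rw [if_neg (fun hc' => h2 hc'.1), if_pos hk, pv_short_eq_singleton ps h2 k hk]
      simp
  · rw [if_neg (fun hc' => hk hc'.2), if_neg hk]
    simp

-- B's bucket stream for k is empty exactly when A's value stream for k is
lemma pv_nil_iff (k : String) (complexes : List (String × List String))
    (h : ∀ c ∈ complexes, c.2.Nodup) :
    pvW2 k (pvOpsB complexes) = [] ↔ pvW k (pvFull complexes) = [] := by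
  rw [pv_w2_full k complexes h, pv_w_full k complexes h,
    List.flatMap_eq_nil_iff, List.flatMap_eq_nil_iff]
  constructor <;> intro hall ps hps <;> have hs := hall ps hps <;>
    obtain ⟨c, hc, hsnd⟩ := List.mem_map.1 hps
  · by_cases hk : k ∈ ps
    · rw [if_pos hk]
      by_cases h2 : 2 ≤ ps.length
      · exact absurd hs (by rw [if_pos ⟨h2, hk⟩]; simp)
      · rw [pv_short_eq_singleton ps h2 k hk]
        simp
    · rw [if_neg hk]
  · by_cases hk : k ∈ ps
    · by_cases h2 : 2 ≤ ps.length
      · rw [if_pos hk] at hs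
        exact absurd hs (pv_filter_ne_nil ps h2 (hsnd ▸ h c hc) k hk)
      · rw [if_neg (fun hc' => h2 hc'.1)]
    · rw [if_neg (fun hc' => hk hc'.2)]

-- keys of A's full stream = first appearances over multi-member complexes
lemma pv_keys_full : ∀ (complexes : List (String × List String)),
    (∀ c ∈ complexes, c.2.Nodup) → ∀ (s : PySem.Set String),
    PySem.Set.update s ((pvFull complexes).map Prod.fst)
      = PySem.Set.update s ((pvOpsB complexes).map Prod.fst) := by
  intro complexes
  induction complexes with
  | nil => intro _ s; rfl
  | cons c rest ih =>
    intro h s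
    have hstepA : pvFull (c :: rest) = pvOpsA c.2 ++ pvFull rest := rfl
    have hstepB : pvOpsB (c :: rest)
        = (if 2 ≤ c.2.length then c.2.map (fun p => (p, c.2)) else []) ++ pvOpsB rest := rfl
    rw [hstepA, hstepB, List.map_append, List.map_append,
      PySem.Set.update_append, PySem.Set.update_append]
    by_cases h2 : 2 ≤ c.2.length
    · rw [pv_keysA c.2 h2 (h c (by simp)) s, if_pos h2, List.map_map]
      have : (Prod.fst ∘ fun p => (p, c.2)) = (id : String → String) := rfl
      rw [this, List.map_id]
      exact ih (fun x hx => h x (by simp [hx])) _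
    · rw [pv_opsA_short c.2 (by omega), if_neg h2]
      exact ih (fun x hx => h x (by simp [hx])) s

-- find? through B's final comprehension
lemma pv_find_map2 (k : String) (f : String → List (List String) → List String) :
    ∀ (l : List (String × List (List String))),
    ((l.map (fun pr => (pr.1, f pr.1 pr.2))).find? (fun pr => pr.1 == k)).map Prod.snd
      = (l.find? (fun pr => pr.1 == k)).map (fun pr => f k pr.2) := by
  intro l
  induction l with
  | nil => simp
  | cons x rest ih =>
    rw [List.map_cons]
    by_cases hx : x.1 = k
    · subst hx
      simp
    · rw [List.find?_cons_of_neg (by simpa using hx), List.find?_cons_of_neg (by simpa using hx)]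
      exact ih

-- ===== VERDICT (by name: the statement is the Claim_ definition above) =====
theorem corum_ints_duped_spec : Claim_equal_corum_ints_duped := by
  intro complexes _ hpre
  unfold Spec_corum_ints_duped corum_ints_duped corum_ints_duped_alt
  rw [pv_A_run, pv_B_run]
  have hEmptyKeysA : (PySem.Dict.empty : PySem.Dict String (List String)).keys = [] := by
    simp [PySem.Dict.empty, PySem.Dict.keys]
  have hEmptyKeysB : (PySem.Dict.empty : PySem.Dict String (List (List String))).keys = [] := by
    simp [PySem.Dict.empty, PySem.Dict.keys]
  apply pv_assoc_ext
  · show (pvRun PySem.Dict.empty (pvFull complexes)).items.map Prod.fst = _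
    have hA : (pvRun PySem.Dict.empty (pvFull complexes)).items.map Prod.fst
        = (pvRun PySem.Dict.empty (pvFull complexes)).keys := rfl
    rw [hA, pvRun_keys, hEmptyKeysA, List.map_map]
    have hcomp : (Prod.fst ∘ fun pr : String × List (List String) =>
        (pr.1, PySem.Set.ofList (pr.2.flatMap (fun ps => ps.filter (fun q => !(q == pr.1))))))
        = Prod.fst := rfl
    rw [hcomp]
    have hB : (pvRun2 PySem.Dict.empty (pvOpsB complexes)).items.map Prod.fst
        = (pvRun2 PySem.Dict.empty (pvOpsB complexes)).keys := rfl
    rw [hB, pvRun2_keys, hEmptyKeysB]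
    exact pv_keys_full complexes hpre []
  · show ((pvRun PySem.Dict.empty (pvFull complexes)).items.map Prod.fst).Nodup
    have hA : (pvRun PySem.Dict.empty (pvFull complexes)).items.map Prod.fst
        = (pvRun PySem.Dict.empty (pvFull complexes)).keys := rfl
    rw [hA]
    exact pvRun_nodup _ _ (hEmptyKeysA ▸ List.nodup_nil)
  · intro k
    have hgetA : ((pvRun PySem.Dict.empty (pvFull complexes)).items.find? (fun p => p.1 == k)).map Prod.snd
        = (pvRun PySem.Dict.empty (pvFull complexes)).get? k := by
      simp [PySem.Dict.get?]
    rw [hgetA, pvRun_get?]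
    rw [pv_find_map2 k (fun p l => PySem.Set.ofList (l.flatMap (fun ps => ps.filter (fun q => !(q == p)))))]
    have hgetB : ((pvRun2 PySem.Dict.empty (pvOpsB complexes)).items.find? (fun pr => pr.1 == k)).map
          (fun pr => PySem.Set.ofList (pr.2.flatMap (fun ps => ps.filter (fun q => !(q == k)))))
        = ((pvRun2 PySem.Dict.empty (pvOpsB complexes)).get? k).map
            (fun l => PySem.Set.ofList (l.flatMap (fun ps => ps.filter (fun q => !(q == k))))) := by
      simp [PySem.Dict.get?, Option.map_map]
      rfl
    rw [hgetB, pvRun2_get?]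
    have hEmptyGetA : (PySem.Dict.empty : PySem.Dict String (List String)).get? k = none := by
      simp [PySem.Dict.empty, PySem.Dict.get?]
    have hEmptyGetB : (PySem.Dict.empty : PySem.Dict String (List (List String))).get? k = none := by
      simp [PySem.Dict.empty, PySem.Dict.get?]
    rw [hEmptyGetA, hEmptyGetB]
    by_cases hW : pvW k (pvFull complexes) = []
    · rw [if_pos hW, if_pos ((pv_nil_iff k complexes hpre).2 hW)]
      rfl
    · rw [if_neg hW, if_neg (fun h2 => hW ((pv_nil_iff k complexes hpre).1 h2))]
      simp only [Option.getD_none, List.nil_append, Option.map_some]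
      congr 1
      rw [pv_streams k complexes hpre]
      rfl
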